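-- pv_equiv track=rewrite | github.com/AlexBuccheri/python | exciting/gw_benchmark_outputs/set7_extra_channel/plots.py | sum_los_per_species
-- ===== SOURCE A (Python) =====
-- def sum_los_per_species(n_los_species_resolved: dict) ->list:
--     """
--     Sum N LOs for each species, per calculation.
--
--     :return: List, n_los, containing the number of LOs per calculation.
--     """
--     species = [key for key in n_los_species_resolved.keys()]
--     n_energy_cutoffs = len(n_los_species_resolved[species[0]])
--
--     n_los = []
--     for i in range(0, n_energy_cutoffs):
--         n = 0
--         for element in species:
--             n += n_los_species_resolved[element][i]
--         n_los.append(n)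
--
--     return n_los
-- ===== SOURCE B (Python) =====
-- def sum_los_per_species(n_los_species_resolved: dict) -> list:
--     """
--     Sum N LOs for each species, per calculation.
--
--     Alternative algorithm: elementwise vector reduction over the value lists
--     (zip-add each species' list into the running totals) instead of an
--     index-driven double loop with repeated key lookups.
--     """
--     values = list(n_los_species_resolved.values())
--     totals = list(values[0])
--     for vs in values[1:]:
--         totals = [t + v for t, v in zip(totals, vs)]
--     return totals
-- ===== Notes on version B (the rewrite author's own statement) =====
-- stated objective: alternative
-- what changed: Replaces the index-driven double loop with repeated dict lookups by an elementwise zip-reduction: the first species' value list seeds the totals and every later value list is zip-added into it, so no range/index bookkeeping and no per-element key lookups remain.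
-- outside the precondition, e.g. on sum_los_per_species({}): A raises IndexError, B raises IndexError; on sum_los_per_species({'A': [1, 2], 'B': [1]}): A raises IndexError, B returns [2]
import Mathlib
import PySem

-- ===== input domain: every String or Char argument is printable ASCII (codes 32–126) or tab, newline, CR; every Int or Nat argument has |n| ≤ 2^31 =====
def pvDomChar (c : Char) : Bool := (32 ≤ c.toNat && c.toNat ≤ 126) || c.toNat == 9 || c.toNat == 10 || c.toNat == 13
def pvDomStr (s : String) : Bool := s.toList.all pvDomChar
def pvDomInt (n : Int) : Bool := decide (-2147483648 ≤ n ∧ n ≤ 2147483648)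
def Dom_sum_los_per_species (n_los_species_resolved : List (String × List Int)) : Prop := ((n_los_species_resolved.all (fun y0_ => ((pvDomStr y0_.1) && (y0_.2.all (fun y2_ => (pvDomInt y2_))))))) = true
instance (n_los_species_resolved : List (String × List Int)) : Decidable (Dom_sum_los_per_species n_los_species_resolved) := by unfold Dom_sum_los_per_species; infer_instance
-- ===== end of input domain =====

-- B replaces A's index-driven double loop with a zip-reduction of the value lists
-- (seed with the first list, zip-add every later list); objective: alternative.


-- ===== PORT A =====
def sum_los_per_species (n_los_species_resolved : List (String × List Int)) : List Int :=
  let dict := PySem.Dict.mk n_los_species_resolved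
  let species := n_los_species_resolved.map (·.1)
  -- species[0] (IndexError on empty dict excluded by Pre_); the missing-key default is never hit inside Pre_
  let n_energy_cutoffs : Int := (dict.getD (PySem.List.pyGetD species 0 "") []).length
  (PySem.List.pyRange 0 n_energy_cutoffs 1).foldl
    (fun n_los i =>
      n_los ++ [species.foldl (fun n element => n + PySem.List.pyGetD (dict.getD element []) i 0) 0])
    []

-- ===== PORT B =====
def sum_los_per_species_alt (n_los_species_resolved : List (String × List Int)) : List Int :=
  let values := (PySem.Dict.mk n_los_species_resolved).values
  -- values[0]: IndexError on the empty dict, excluded by Pre_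
  let totals := PySem.List.pyGetD values 0 []
  (PySem.List.slice values (some 1) none).foldl
    (fun totals vs => (totals.zip vs).map (fun p => p.1 + p.2)) totals

-- ===== PRECONDITION & SPEC =====
-- Pre_ excludes exactly the inputs where Python A raises: the empty dict (IndexError on
-- species[0]) and ragged dicts where some species' list is shorter than the first species'
-- (IndexError in the inner loop). Key Nodup is not a narrowing: a Python dict cannot
-- repeat keys.
def Pre_sum_los_per_species (n_los_species_resolved : List (String × List Int)) : Prop :=
  n_los_species_resolved ≠ [] ∧ (n_los_species_resolved.map (·.1)).Nodup ∧
    ∀ p ∈ n_los_species_resolved, (n_los_species_resolved.headD ("", [])).2.length ≤ p.2.length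
instance (n_los_species_resolved : List (String × List Int)) : Decidable (Pre_sum_los_per_species n_los_species_resolved) := by unfold Pre_sum_los_per_species; infer_instance

def pvWitness_sum_los_per_species : (List (String × List Int)) := [("A", [1, 2]), ("B", [3, 4])]

def Spec_sum_los_per_species (n_los_species_resolved : List (String × List Int)) (out : List Int) : Prop := out = sum_los_per_species_alt n_los_species_resolved
instance (n_los_species_resolved : List (String × List Int)) (out : List Int) : Decidable (Spec_sum_los_per_species n_los_species_resolved out) := by unfold Spec_sum_los_per_species; infer_instance

-- ===== CLAIM (what is proved, stated in full; the proofs are below) =====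
def Claim_equal_sum_los_per_species : Prop := ∀ (n_los_species_resolved : List (String × List Int)), Dom_sum_los_per_species n_los_species_resolved → Pre_sum_los_per_species n_los_species_resolved → Spec_sum_los_per_species n_los_species_resolved (sum_los_per_species n_los_species_resolved)

-- ===== LEMMAS AND PROOFS =====

-- One zip-add step, read off pointwise: for 0 ≤ i < |t| ≤ |vs|,
-- the i-th entry of the zipped sum is t[i] + vs[i].
theorem pv_zip_step (t vs : List Int) (hlen : t.length ≤ vs.length)
    (i : Int) (h0 : 0 ≤ i) (hi : i < (t.length : Int)) :
    PySem.List.pyGetD ((t.zip vs).map (fun p => p.1 + p.2)) i 0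
      = PySem.List.pyGetD t i 0 + PySem.List.pyGetD vs i 0 := by
  obtain ⟨k, rfl⟩ := Int.eq_ofNat_of_zero_le h0
  have hk : k < t.length := by exact_mod_cast hi
  have hkz : k < (t.zip vs).length := by simp [List.length_zip]; omega
  have hkv : k < vs.length := lt_of_lt_of_le hk hlen
  rw [PySem.List.pyGetD_natCast, PySem.List.pyGetD_natCast, PySem.List.pyGetD_natCast]
  rw [List.getD_eq_getElem _ _ (by simpa using hkz), List.getD_eq_getElem _ _ hk,
      List.getD_eq_getElem _ _ hkv]
  simp [List.getElem_zip]

-- B's reduction, characterised: folding zip-add over a list of value lists all at least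
-- as long as the seed produces, pointwise, the species-order sum started at the seed entry.
theorem pv_zipfold (rest : List (List Int)) : ∀ (t : List Int),
    (∀ v ∈ rest, t.length ≤ v.length) →
    rest.foldl (fun t vs => (t.zip vs).map (fun p => p.1 + p.2)) t
      = (PySem.List.pyRange 0 (t.length : Int) 1).map
          (fun i => rest.foldl (fun m v => m + PySem.List.pyGetD v i 0) (PySem.List.pyGetD t i 0)) := by
  induction rest with
  | nil =>
    intro t _
    simpa using (PySem.List.map_pyGetD_pyRange_zero' t 0).symm
  | cons vs rest ih =>
    intro t hlen
    have hvs : t.length ≤ vs.length := hlen vs (by simp)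
    have hstep : ((t.zip vs).map (fun p => p.1 + p.2)).length = t.length := by
      simp [List.length_zip]; omega
    simp only [List.foldl_cons]
    rw [ih _ (by intro v hv; rw [hstep]; exact hlen v (List.mem_cons_of_mem _ hv))]
    rw [hstep]
    apply List.map_congr_left
    intro i hi
    rw [PySem.List.mem_pyRange_one] at hi
    rw [pv_zip_step t vs hvs i hi.1 hi.2]

-- A's per-key lookups collapse to the value lists under Nodup keys.
theorem pv_lookup (l : List (String × List Int)) (hnd : (l.map (·.1)).Nodup) :
    l.map (fun p => (PySem.Dict.mk l).getD p.1 []) = l.map (·.2) := by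
  apply List.map_congr_left
  intro p hp
  exact PySem.Dict.getD_of_mem_items (d := PySem.Dict.mk l) (by simpa using hp) (by simpa using hnd) []

theorem pv_eq_on_pre (l : List (String × List Int)) (hpre : Pre_sum_los_per_species l) :
    sum_los_per_species l = sum_los_per_species_alt l := by
  obtain ⟨hne, hnd, hlen⟩ := hpre
  obtain ⟨p0, rest, rfl⟩ := List.exists_cons_of_ne_nil hne
  unfold sum_los_per_species sum_los_per_species_alt
  simp only [PySem.List.slice_from_one]
  -- name the value lists
  have hvals : (PySem.Dict.mk (p0 :: rest)).values = p0.2 :: rest.map (·.2) := by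
    simp [PySem.Dict.values]
  have hget0 : (PySem.Dict.mk (p0 :: rest)).getD
      (PySem.List.pyGetD ((p0 :: rest).map (·.1)) 0 "") [] = p0.2 := by
    rw [List.map_cons, PySem.List.pyGetD_zero_cons]
    exact PySem.Dict.getD_of_mem_items (d := PySem.Dict.mk (p0 :: rest)) (by exact List.mem_cons_self) (by simpa using hnd) []
  rw [hget0, hvals]
  -- B side: seed and tail
  have htail : ∀ v ∈ rest.map (·.2), p0.2.length ≤ v.length := by
    intro v hv
    obtain ⟨q, hq, rfl⟩ := List.mem_map.1 hv
    simpa using hlen q (List.mem_cons_of_mem _ hq)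
  rw [PySem.List.pyGetD_zero_cons, List.tail_cons, pv_zipfold _ _ htail]
  -- A side: foldl-append is a map over the range
  rw [PySem.List.foldl_append_singleton_eq_map]
  apply List.map_congr_left
  intro i hi
  -- collapse the key lookups, then peel the head of the species fold
  have hfold : ((p0 :: rest).map (·.1)).foldl
      (fun n element => n + PySem.List.pyGetD ((PySem.Dict.mk (p0 :: rest)).getD element []) i 0) 0
      = ((p0 :: rest).map (fun p => (PySem.Dict.mk (p0 :: rest)).getD p.1 [])).foldl
          (fun n v => n + PySem.List.pyGetD v i 0) 0 := by
    simp [List.foldl_map]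
  rw [hfold, pv_lookup _ hnd]
  simp [List.foldl_map]

-- ===== VERDICT (by name: the statement is the Claim_ definition above) =====
theorem sum_los_per_species_spec : Claim_equal_sum_los_per_species := by
  intro l _ hpre
  unfold Spec_sum_los_per_species
  exact pv_eq_on_pre l hpre
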